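-- pv_equiv track=rewrite | github.com/shatieu/python-shorts | three in a row.py | anyone_won
-- ===== SOURCE A (Python) =====
-- def anyone_won (taken, whos_turn):                                  #checks if there are 3 Os next to each other, must be at the end of cycle!
--     winning_list =[]
--     for x in taken:
--         if x != -1:
--             winning_list.append (x)
--         else:
--             winning_list [:] = []
--         if len(winning_list) == 3:
--             return (whos_turn)
--     return ("nobody")
-- ===== SOURCE B (Python) =====
-- def anyone_won(taken, whos_turn):
--     rest = taken
--     while rest:
--         if rest[0] == -1:
--             rest = rest[1:]
--         else:
--             k = 0
--             while k < len(rest) and rest[k] != -1: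
--                 k += 1
--             if k >= 3:
--                 return whos_turn
--             rest = rest[k:]
--     return "nobody"
-- ===== Notes on version B (the rewrite author's own statement) =====
-- stated objective: alternative
-- what changed: Replaces A's accumulate-and-reset running scan (append to winning_list, clear on -1, test length each step) with a two-phase run scan: find each maximal run of non-(-1) entries with an inner length-counting loop, test its length >= 3, and skip past it.
import Mathlib
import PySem

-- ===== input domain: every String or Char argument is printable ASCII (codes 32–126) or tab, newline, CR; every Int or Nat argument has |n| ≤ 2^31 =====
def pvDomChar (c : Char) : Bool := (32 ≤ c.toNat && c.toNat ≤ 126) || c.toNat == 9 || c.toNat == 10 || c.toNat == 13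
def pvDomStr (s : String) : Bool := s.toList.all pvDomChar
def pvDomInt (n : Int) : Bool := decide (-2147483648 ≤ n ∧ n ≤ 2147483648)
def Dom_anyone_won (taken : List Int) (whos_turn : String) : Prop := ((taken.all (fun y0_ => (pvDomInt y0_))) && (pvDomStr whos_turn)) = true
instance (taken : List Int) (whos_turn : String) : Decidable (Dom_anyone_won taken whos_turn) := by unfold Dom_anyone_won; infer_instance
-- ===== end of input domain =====

-- B replaces A's accumulate-and-reset scan by a run-by-run scan (find each maximal non-(-1) run, test its length); alternative decomposition, same cost.

-- ===== PORT A =====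
-- the for-loop over taken with accumulator winning_list (cleared on -1, length tested after each step)
def anyoneWonGoA (w : String) : List Int → List Int → String
  | _, [] => "nobody"
  | wl, x :: xs =>
    let wl' := if x ≠ -1 then wl ++ [x] else []
    if wl'.length = 3 then w else anyoneWonGoA w wl' xs

def anyone_won (taken : List Int) (whos_turn : String) : String :=
  anyoneWonGoA whos_turn [] taken

-- ===== PORT B =====
-- inner while loop of B: length of the leading run of non-(-1) entries
def runLen : List Int → Nat
  | [] => 0
  | x :: xs => if x = -1 then 0 else runLen xs + 1

-- outer while loop of B: skip a -1, or measure the leading run, win on ≥ 3, else skip past it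
def anyoneWonGoB (w : String) : List Int → String
  | [] => "nobody"
  | x :: xs =>
    if hx : x = -1 then anyoneWonGoB w xs
    else
      let k := runLen (x :: xs)
      if 3 ≤ k then w else anyoneWonGoB w ((x :: xs).drop k)
termination_by l => l.length
decreasing_by
  · simp
  · have hr : runLen (x :: xs) = runLen xs + 1 := by simp [runLen, hx]
    simp only [List.length_drop, hr, List.length_cons]
    omega

def anyone_won_alt (taken : List Int) (whos_turn : String) : String :=
  anyoneWonGoB whos_turn taken

-- ===== PRECONDITION & SPEC =====
def Spec_anyone_won (taken : List Int) (whos_turn : String) (out : String) : Prop := out = anyone_won_alt taken whos_turn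
instance (taken : List Int) (whos_turn : String) (out : String) : Decidable (Spec_anyone_won taken whos_turn out) := by unfold Spec_anyone_won; infer_instance

-- ===== CLAIM (what is proved, stated in full; the proofs are below) =====
def Claim_equal_anyone_won : Prop := ∀ (taken : List Int) (whos_turn : String), Dom_anyone_won taken whos_turn → Spec_anyone_won taken whos_turn (anyone_won taken whos_turn)

-- ===== LEMMAS AND PROOFS =====

-- counter abstraction of A's loop: only the length of winning_list matters
def goA' (w : String) : Nat → List Int → String
  | _, [] => "nobody"
  | n, x :: xs =>
    let n' := if x ≠ -1 then n + 1 else 0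
    if n' = 3 then w else goA' w n' xs

theorem goA'_cons_ne (w : String) (n : Nat) (x : Int) (xs : List Int) (hx : ¬ x = -1) :
    goA' w n (x :: xs) = if n + 1 = 3 then w else goA' w (n + 1) xs := by
  simp [goA', hx]

theorem goA'_cons_eq (w : String) (n : Nat) (xs : List Int) :
    goA' w n (-1 :: xs) = goA' w 0 xs := by
  simp [goA']

theorem goB_nil (w : String) : anyoneWonGoB w [] = "nobody" := by
  rw [anyoneWonGoB]

theorem goB_cons (w : String) (x : Int) (xs : List Int) :
    anyoneWonGoB w (x :: xs) =
      if x = -1 then anyoneWonGoB w xs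
      else if 3 ≤ runLen (x :: xs) then w
      else anyoneWonGoB w ((x :: xs).drop (runLen (x :: xs))) := by
  rw [anyoneWonGoB]
  by_cases hx : x = -1 <;> simp [hx]

theorem goA_eq_goA' (w : String) (xs : List Int) : ∀ wl : List Int,
    anyoneWonGoA w wl xs = goA' w wl.length xs := by
  induction xs with
  | nil => intro wl; rfl
  | cons x xs ih =>
    intro wl
    simp only [anyoneWonGoA, goA']
    by_cases hx : x = -1 <;> simp [hx, ih]

theorem goA'_win (w : String) : ∀ (xs : List Int) (n : Nat),
    n < 3 → 3 ≤ n + runLen xs → goA' w n xs = w := by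
  intro xs
  induction xs with
  | nil => intro n h1 h2; simp [runLen] at h2; omega
  | cons x xs ih =>
    intro n h1 h2
    by_cases hx : x = -1
    · exfalso; simp [runLen, hx] at h2; omega
    · have hr : runLen (x :: xs) = runLen xs + 1 := by simp [runLen, hx]
      rw [hr] at h2
      rw [goA'_cons_ne w n x xs hx]
      by_cases h3 : n + 1 = 3
      · simp [h3]
      · rw [if_neg h3]
        exact ih (n + 1) (by omega) (by omega)

theorem goA'_skip (w : String) : ∀ (xs : List Int) (n : Nat),
    n + runLen xs < 3 → goA' w n xs = goA' w 0 (xs.drop (runLen xs)) := by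
  intro xs
  induction xs with
  | nil => intro n _; rfl
  | cons x xs ih =>
    intro n h
    by_cases hx : x = -1
    · subst hx
      have h0 : runLen ((-1 : Int) :: xs) = 0 := by simp [runLen]
      rw [h0, List.drop_zero, goA'_cons_eq, goA'_cons_eq]
    · have hr : runLen (x :: xs) = runLen xs + 1 := by simp [runLen, hx]
      rw [hr] at h ⊢
      rw [goA'_cons_ne w n x xs hx, if_neg (by omega : ¬ n + 1 = 3),
        List.drop_succ_cons]
      exact ih (n + 1) (by omega)

theorem goA'_eq_goB (w : String) : ∀ (xs : List Int),
    goA' w 0 xs = anyoneWonGoB w xs := by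
  intro xs
  induction hn : xs.length using Nat.strong_induction_on generalizing xs with
  | _ m ih =>
    match xs with
    | [] => rw [goB_nil]; rfl
    | x :: xs =>
      rw [goB_cons]
      by_cases hx : x = -1
      · rw [if_pos hx]
        subst hx
        rw [goA'_cons_eq]
        exact ih xs.length (by simp [← hn]) xs rfl
      · rw [if_neg hx]
        by_cases hk : 3 ≤ runLen (x :: xs)
        · rw [if_pos hk]
          exact goA'_win w (x :: xs) 0 (by omega) (by omega)
        · rw [if_neg hk]
          have hrl : runLen (x :: xs) = runLen xs + 1 := by simp [runLen, hx]
          rw [goA'_skip w (x :: xs) 0 (by omega)]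
          have hlen : ((x :: xs).drop (runLen (x :: xs))).length < m := by
            simp only [List.length_drop, ← hn, List.length_cons]
            omega
          exact ih _ hlen _ rfl

-- ===== VERDICT (by name: the statement is the Claim_ definition above) =====
theorem anyone_won_spec : Claim_equal_anyone_won := by
  intro taken whos_turn _
  unfold Spec_anyone_won anyone_won anyone_won_alt
  rw [goA_eq_goA' whos_turn taken []]
  exact goA'_eq_goB whos_turn taken
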